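-- pv_equiv track=rewrite | github.com/direvus/adventofcode | advent19.py | describe_ranges
-- ===== SOURCE A (Python) =====
-- MIN_RATING = 1
--
-- MAX_RATING = 4000
--
-- def describe_ranges(ranges: dict) -> str:
--     labels = []
--     for k, v in ranges.items():
--         if len(v) == MAX_RATING:
--             labels.append(f"{k}: ALL")
--             continue
--         if len(v) == 0:
--             labels.append(f"{k}: NONE")
--             continue
--         spans = []
--         low = None
--         high = None
--         for i in range(MIN_RATING, MAX_RATING + 1):
--             if i in v:
--                 if low is None:
--                     low = i
--                 high = i
--             elif low is not None:
--                 span = f"{low}-{high}" if low < high else str(low)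
--                 spans.append(span)
--                 low = None
--         if low is not None:
--             spans.append(f"{low}-{high}")
--         labels.append(f"{k}: {','.join(spans)}")
--     return ', '.join(labels)
-- ===== SOURCE B (Python) =====
-- MIN_RATING = 1
--
-- MAX_RATING = 4000
--
-- def _take_run(prev, rest):
--     # consume the maximal consecutive run continuing at prev; return its end and the suffix after it
--     i = 0
--     while i < len(rest) and rest[i] == prev + 1:
--         prev = rest[i]
--         i += 1
--     return prev, rest[i:]
--
-- def _runs(members):
--     spans = []
--     while members:
--         start = members[0]
--         prev, members = _take_run(start, members[1:])
--         spans.append(f"{start}-{prev}" if start < prev else str(start))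
--     return spans
--
-- def _label(v):
--     if len(v) == MAX_RATING:
--         return "ALL"
--     if len(v) == 0:
--         return "NONE"
--     members = sorted({x for x in v if MIN_RATING <= x <= MAX_RATING})
--     return ','.join(_runs(members))
--
-- def describe_ranges(ranges: dict) -> str:
--     return ', '.join(f"{k}: {_label(v)}" for k, v in ranges.items())
-- ===== Notes on version B (the rewrite author's own statement) =====
-- stated objective: faster
-- what changed: Instead of scanning every integer 1..4000 per key and testing list membership, B sorts the distinct in-range members once per key and then repeatedly splits off one maximal consecutive run at a time (_take_run), formatting each run as it is cut off; the full-range scan and the low/high state machine disappear.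
-- intended difference: On keys whose non-empty value (of length != 4000) contains 4000 but not 3999, A's unconditional trailing append prints the final singleton run as '4000-4000' while B prints the intended '4000', consistent with how A itself prints every other singleton run. — e.g. on describe_ranges([("x", [4000])]): A returns "x: 4000-4000", B returns "x: 4000"
import Mathlib
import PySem

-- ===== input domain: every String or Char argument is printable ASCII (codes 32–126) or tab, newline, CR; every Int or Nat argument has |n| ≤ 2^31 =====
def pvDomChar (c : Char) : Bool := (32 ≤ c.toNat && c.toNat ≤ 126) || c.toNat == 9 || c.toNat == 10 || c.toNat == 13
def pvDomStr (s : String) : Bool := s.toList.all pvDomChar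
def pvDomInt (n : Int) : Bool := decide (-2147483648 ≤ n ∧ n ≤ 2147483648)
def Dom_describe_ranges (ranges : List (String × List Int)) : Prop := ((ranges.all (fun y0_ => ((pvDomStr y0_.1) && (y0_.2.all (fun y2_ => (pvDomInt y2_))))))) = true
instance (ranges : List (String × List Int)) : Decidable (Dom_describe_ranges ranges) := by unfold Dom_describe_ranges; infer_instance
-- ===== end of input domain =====

-- B sorts the distinct in-range members per key and splits off one maximal consecutive run at a
-- time instead of scanning all of 1..4000 with a low/high state machine (objective: faster); on
-- keys whose set contains 4000 but not 3999 A prints the trailing singleton run as "4000-4000"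
-- while B prints the intended "4000" (stated as D_ below).


-- ===== PORT A =====
-- span = f"{low}-{high}" if low < high else str(low)
def pvSpanA (low high : Int) : String :=
  if low < high then PySem.Int.toStr low ++ "-" ++ PySem.Int.toStr high else PySem.Int.toStr low

-- one iteration of A's 'for i in range(MIN_RATING, MAX_RATING + 1)' loop; state (spans, low, high)
def pvStepA (v : List Int) (st : List String × Option Int × Option Int) (i : Int) :
    List String × Option Int × Option Int :=
  match st with
  | (spans, low, high) =>
    if v.contains i then (spans, some (low.getD i), some i)
    else
      match low with
      -- high.getD l: Python reads 'high' here; it is always set when 'low' is, default unreachable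
      | some l => (spans ++ [pvSpanA l (high.getD l)], none, high)
      | none => (spans, none, high)

-- the trailing 'if low is not None: spans.append(f"{low}-{high}")' — dash form unconditionally
def pvFinishA (st : List String × Option Int × Option Int) : List String :=
  match st with
  | (spans, some l, high) =>
      spans ++ [PySem.Int.toStr l ++ "-" ++
        (match high with | some h => PySem.Int.toStr h | none => "None")]
  | (spans, none, _) => spans

def pvLabelA (k : String) (v : List Int) : String :=
  if v.length = 4000 then k ++ ": ALL"
  else if v.length = 0 then k ++ ": NONE"
  else k ++ ": " ++ PySem.Str.join ","
        (pvFinishA ((PySem.List.pyRange 1 4001 1).foldl (pvStepA v) ([], none, none)))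

def describe_ranges (ranges : List (String × List Int)) : String :=
  PySem.Str.join ", " (ranges.foldl (fun labels kv => labels ++ [pvLabelA kv.1 kv.2]) [])

-- ===== PORT B =====
-- f"{start}-{prev}" if start < prev else str(start)
def pvSpanB (start prev : Int) : String :=
  if start < prev then PySem.Int.toStr start ++ "-" ++ PySem.Int.toStr prev else PySem.Int.toStr start

-- B's _take_run: consume the maximal consecutive run continuing at prev; return (run end, suffix)
def pvTakeRun (prev : Int) : List Int → Int × List Int
  | [] => (prev, [])
  | x :: t => if x = prev + 1 then pvTakeRun x t else (prev, x :: t)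

-- needed by pvRuns for termination
lemma pvTakeRun_len (prev : Int) (m : List Int) : (pvTakeRun prev m).2.length ≤ m.length := by
  induction m generalizing prev with
  | nil => simp [pvTakeRun]
  | cons x t ih =>
    simp only [pvTakeRun]
    split
    · exact le_trans (ih x) (by simp)
    · simp

-- B's _runs: cut off one run at a time, formatting each as it is removed
def pvRuns : List Int → List String
  | [] => []
  | x :: t => pvSpanB x (pvTakeRun x t).1 :: pvRuns (pvTakeRun x t).2
termination_by m => m.length
decreasing_by simpa using Nat.lt_succ_of_le (pvTakeRun_len x t)

-- B's _label
def pvLabelB (v : List Int) : String :=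
  if v.length = 4000 then "ALL"
  else if v.length = 0 then "NONE"
  else
    let members := PySem.List.sorted
      (PySem.Set.ofList (v.filter (fun x => 1 ≤ x && x ≤ 4000))) (fun x => x) false
    PySem.Str.join "," (pvRuns members)

def describe_ranges_alt (ranges : List (String × List Int)) : String :=
  PySem.Str.join ", " (ranges.map (fun kv => kv.1 ++ ": " ++ pvLabelB kv.2))

-- ===== PRECONDITION & SPEC =====
-- On keys whose value list is non-empty, not of length 4000, and contains 4000 but not 3999, A's
-- trailing append prints the final singleton run as "4000-4000" while B prints the intended "4000";
-- everywhere else the outputs are identical.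
def D_describe_ranges (ranges : List (String × List Int)) : Prop :=
  ∃ kv ∈ ranges, kv.2.length ≠ 4000 ∧ kv.2 ≠ [] ∧ (4000:Int) ∈ kv.2 ∧ (3999:Int) ∉ kv.2
instance (ranges : List (String × List Int)) : Decidable (D_describe_ranges ranges) := by
  unfold D_describe_ranges; infer_instance

def Spec_describe_ranges (ranges : List (String × List Int)) (out : String) : Prop :=
  ¬ D_describe_ranges ranges → out = describe_ranges_alt ranges
instance (ranges : List (String × List Int)) (out : String) : Decidable (Spec_describe_ranges ranges out) := by
  unfold Spec_describe_ranges; infer_instance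

def pvDiffWitness_describe_ranges : (List (String × List Int)) := [("x", [4000])]
def pvDiffWitnessOut_describe_ranges : String × String := ("x: 4000-4000", "x: 4000")

-- ===== CLAIM (what is proved, stated in full; the proofs are below) =====
def Claim_unchanged_describe_ranges : Prop := ∀ (ranges : List (String × List Int)), Dom_describe_ranges ranges → Spec_describe_ranges ranges (describe_ranges ranges)
def Claim_changed_describe_ranges : Prop := Dom_describe_ranges (pvDiffWitness_describe_ranges) ∧ D_describe_ranges (pvDiffWitness_describe_ranges) ∧ describe_ranges (pvDiffWitness_describe_ranges) = pvDiffWitnessOut_describe_ranges.1 ∧ describe_ranges_alt (pvDiffWitness_describe_ranges) = pvDiffWitnessOut_describe_ranges.2 ∧ pvDiffWitnessOut_describe_ranges.1 ≠ pvDiffWitnessOut_describe_ranges.2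

-- ===== LEMMAS AND PROOFS =====

-- proof-only intermediate form of B's grouping: the same runs computed by a single fold with
-- (spans, start, prev) state; pvRuns is proved equal to it (pvRuns_eq) and the fold form is
-- compared with A's scan (pvScanEq)
def pvStepB (st : List String × Option Int × Option Int) (x : Int) :
    List String × Option Int × Option Int :=
  match st with
  | (spans, none, _) => (spans, some x, some x)
  | (spans, some s, prev) =>
      let p := prev.getD s
      if x ≠ p + 1 then (spans ++ [pvSpanB s p], some x, some x)
      else (spans, some s, some x)

def pvFinishB (st : List String × Option Int × Option Int) : List String :=
  match st with
  | (spans, some s, prev) => spans ++ [pvSpanB s (prev.getD s)]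
  | (spans, none, _) => spans

lemma pvRuns_cons (x : Int) (t : List Int) :
    pvRuns (x :: t) = pvSpanB x (pvTakeRun x t).1 :: pvRuns (pvTakeRun x t).2 := by
  rw [pvRuns.eq_def]

-- the D-exclusion hypothesis, propagated through the scan
def pvTopHyp (a : Int) (n : Nat) (m : List Int) (st : Option Int) : Prop :=
  match st with
  | none => ((a + n - 1) ∈ m → (a + n - 2) ∈ m)
  | some l => ((a + n - 1) ∈ m → ((a + n - 2) ∈ m ∨ a + n - 1 = a)) ∧ (n = 0 → l < a - 1)

-- step-shape lemmas for the two folds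
lemma pvStepA_mem (v : List Int) (spans : List String) (low high : Option Int) (i : Int)
    (h : v.contains i = true) :
    pvStepA v (spans, low, high) i = (spans, some (low.getD i), some i) := by
  have h' : i ∈ v := List.contains_iff_mem.mp h
  simp [pvStepA, h']

lemma pvStepA_not_mem_none (v : List Int) (spans : List String) (high : Option Int) (i : Int)
    (h : ¬ v.contains i = true) :
    pvStepA v (spans, none, high) i = (spans, none, high) := by
  have h' : i ∉ v := by simpa [List.contains_iff_mem] using h
  simp [pvStepA, h']

lemma pvStepA_not_mem_some (v : List Int) (spans : List String) (l : Int) (high : Option Int) (i : Int)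
    (h : ¬ v.contains i = true) :
    pvStepA v (spans, some l, high) i = (spans ++ [pvSpanA l (high.getD l)], none, high) := by
  have h' : i ∉ v := by simpa [List.contains_iff_mem] using h
  simp [pvStepA, h']

lemma pvStepB_none (spans : List String) (p0 : Option Int) (x : Int) :
    pvStepB (spans, none, p0) x = (spans, some x, some x) := rfl

lemma pvStepB_some_ext (spans : List String) (s p x : Int) (h : x = p + 1) :
    pvStepB (spans, some s, some p) x = (spans, some s, some x) := by
  simp [pvStepB, h]

-- B's run-splitting recursion equals the fold with a pending run (s, p)
lemma pvBridge (m : List Int) : ∀ (spans : List String) (s p : Int),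
    pvFinishB (m.foldl pvStepB (spans, some s, some p)) =
    spans ++ pvSpanB s (pvTakeRun p m).1 :: pvRuns (pvTakeRun p m).2 := by
  induction m with
  | nil => intro spans s p; simp [pvFinishB, pvTakeRun, pvRuns]
  | cons x t ih =>
    intro spans s p
    by_cases hx : x = p + 1
    · rw [List.foldl_cons, pvStepB_some_ext spans s p x hx, ih]
      simp [pvTakeRun, hx]
    · have hstep : pvStepB (spans, some s, some p) x = (spans ++ [pvSpanB s p], some x, some x) := by
        simp [pvStepB, hx]
      rw [List.foldl_cons, hstep, ih]
      simp [pvTakeRun, hx, pvRuns_cons]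

-- B's pvRuns equals the flushed fold from the empty state
lemma pvRuns_eq (m : List Int) :
    pvRuns m = pvFinishB (m.foldl pvStepB ([], none, none)) := by
  cases m with
  | nil => simp [pvRuns, pvFinishB]
  | cons x t =>
    rw [List.foldl_cons, pvStepB_none, pvBridge, pvRuns_cons]
    simp

-- a pending B run whose continuation cannot extend it may be flushed eagerly
lemma pvFlushB (m : List Int) (spans : List String) (l p : Int) (q0 : Option Int)
    (h : ∀ x ∈ m, p + 1 < x) :
    pvFinishB (m.foldl pvStepB (spans, some l, some p)) =
    pvFinishB (m.foldl pvStepB (spans ++ [pvSpanB l p], none, q0)) := by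
  cases m with
  | nil => simp [pvFinishB]
  | cons x t =>
    have hx : x ≠ p + 1 := by have := h x (by simp); omega
    simp [List.foldl_cons, pvStepB, hx]

-- core invariant: A's membership scan of indices a..a+n-1 and B's grouping fold over the sorted
-- member list m produce the same flushed span list
lemma pvScanEq (v : List Int) (n : Nat) : ∀ (a : Int) (m : List Int) (spans : List String)
    (st : Option Int) (hA hB : Option Int),
    m.Pairwise (· < ·) →
    (∀ x : Int, x ∈ m ↔ (a ≤ x ∧ x < a + n ∧ v.contains x = true)) →
    (∀ l, st = some l → l ≤ a - 1 ∧ hA = some (a - 1) ∧ hB = some (a - 1)) →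
    pvTopHyp a n m st →
    pvFinishA ((PySem.List.pyRange a (a + n) 1).foldl (pvStepA v) (spans, st, hA)) =
    pvFinishB (m.foldl pvStepB (spans, st, hB)) := by
  induction n with
  | zero =>
    intro a m spans st hA hB hsort hmem hst htop
    have hm : m = [] := by
      apply List.eq_nil_iff_forall_not_mem.mpr
      intro x hx
      have := (hmem x).mp hx
      push_cast at this; omega
    subst hm
    rw [PySem.List.pyRange_one_eq_nil (by push_cast; omega)]
    cases st with
    | none => simp [pvFinishA, pvFinishB]
    | some l =>
      obtain ⟨hla, hAe, hBe⟩ := hst l rfl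
      subst hAe; subst hBe
      have hlt : l < a - 1 := htop.2 rfl
      simp [pvFinishA, pvFinishB, pvSpanB, hlt]
  | succ n ih =>
    intro a m spans st hA hB hsort hmem hst htop
    have hcons : PySem.List.pyRange a (a + (n+1 : Nat)) 1 = a :: PySem.List.pyRange (a+1) (a + (n+1 : Nat)) 1 :=
      PySem.List.pyRange_one_cons (by push_cast; omega)
    have hend : a + ((n+1 : Nat) : Int) = (a + 1) + (n : Int) := by push_cast; omega
    have e1 : a + ((n+1 : Nat) : Int) - 1 = a + (n : Int) := by push_cast; ring
    have e2 : a + ((n+1 : Nat) : Int) - 2 = a + (n : Int) - 1 := by push_cast; ring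
    have e3 : (a + 1) + ((n : Nat) : Int) - 1 = a + (n : Int) := by ring
    have e4 : (a + 1) + ((n : Nat) : Int) - 2 = a + (n : Int) - 1 := by ring
    rw [hcons, hend]
    by_cases hv : v.contains a = true
    · -- a is a member: both sides start or extend the current run
      have haM : a ∈ m := (hmem a).mpr ⟨le_refl _, by push_cast; omega, hv⟩
      obtain ⟨m', rfl⟩ : ∃ m', m = a :: m' := by
        cases m with
        | nil => simp at haM
        | cons y t =>
          rcases List.mem_cons.mp haM with h | h
          · exact ⟨t, by rw [h]⟩
          · have hy : a ≤ y := ((hmem y).mp (by simp)).1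
            have := (List.pairwise_cons.mp hsort).1 a h
            omega
      have hgt : ∀ y ∈ m', a < y := (List.pairwise_cons.mp hsort).1
      have hpw : m'.Pairwise (· < ·) := (List.pairwise_cons.mp hsort).2
      have hmem' : ∀ x : Int, x ∈ m' ↔ ((a+1) ≤ x ∧ x < (a+1) + (n : Int) ∧ v.contains x = true) := by
        intro x
        constructor
        · intro hx
          have h1 := (hmem x).mp (List.mem_cons_of_mem _ hx)
          have h2 := hgt x hx
          push_cast at h1
          exact ⟨by omega, by omega, h1.2.2⟩
        · intro ⟨h1, h2, h3⟩
          have : x ∈ a :: m' := (hmem x).mpr ⟨by omega, by push_cast; omega, h3⟩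
          rcases List.mem_cons.mp this with h | h
          · omega
          · exact h
      cases st with
      | none =>
        have htopu : (a + ((n+1 : Nat) : Int) - 1) ∈ a :: m' → (a + ((n+1 : Nat) : Int) - 2) ∈ a :: m' := htop
        have htop' : a + (n : Int) ∈ a :: m' → a + (n : Int) - 1 ∈ a :: m' := by
          intro h
          have := htopu (by rw [e1]; exact h)
          rwa [e2] at this
        rw [List.foldl_cons, List.foldl_cons, pvStepA_mem v spans none hA a hv,
          pvStepB_none spans hB a, Option.getD_none]
        have hsome : some a = some ((a + 1) - 1) := by rw [show (a : Int) + 1 - 1 = a from by ring]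
        apply ih (a+1) m' spans (some a) (some a) (some a) hpw hmem'
          (by intro l hl; cases hl; exact ⟨by omega, hsome, hsome⟩)
        constructor
        · intro hT
          rw [e3] at hT
          rcases List.mem_cons.mp (htop' (List.mem_cons_of_mem _ hT)) with h | h
          · right
            have h2 := hgt _ hT
            omega
          · left
            rwa [e4]
        · intro hn0
          exfalso
          subst hn0
          have h := htop' (by simp)
          rcases List.mem_cons.mp h with h | h
          · omega
          · have := hgt _ h
            omega
      | some l =>
        obtain ⟨hla, hAe, hBe⟩ := hst l rfl
        subst hAe; subst hBe
        have htopu : ((a + ((n+1 : Nat) : Int) - 1) ∈ a :: m' → ((a + ((n+1 : Nat) : Int) - 2) ∈ a :: m' ∨ a + ((n+1 : Nat) : Int) - 1 = a)) ∧ ((n+1 : Nat) = 0 → l < a - 1) := htop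
        have htop' : a + (n : Int) ∈ a :: m' → (a + (n : Int) - 1 ∈ a :: m' ∨ a + (n : Int) = a) := by
          intro h
          rcases htopu.1 (by rw [e1]; exact h) with h | h
          · left; rwa [e2] at h
          · right; omega
        rw [List.foldl_cons, List.foldl_cons, pvStepA_mem v spans (some l) (some (a-1)) a hv,
          pvStepB_some_ext spans l (a-1) a (by ring), Option.getD_some]
        have hsome : some a = some ((a + 1) - 1) := by rw [show (a : Int) + 1 - 1 = a from by ring]
        apply ih (a+1) m' spans (some l) (some a) (some a) hpw hmem'
          (by intro l' hl'; cases hl'; exact ⟨by omega, hsome, hsome⟩)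
        constructor
        · intro hT
          rw [e3] at hT
          rcases htop' (List.mem_cons_of_mem _ hT) with h | h
          · rcases List.mem_cons.mp h with h | h
            · right
              have h2 := hgt _ hT
              omega
            · left
              rwa [e4]
          · right
            have h2 := hgt _ hT
            omega
        · intro hn0
          omega
    · -- a is not a member
      have haM : a ∉ m := fun hx => hv ((hmem a).mp hx).2.2
      have hmem' : ∀ x : Int, x ∈ m ↔ ((a+1) ≤ x ∧ x < (a+1) + (n : Int) ∧ v.contains x = true) := by
        intro x
        constructor
        · intro hx
          have h1 := (hmem x).mp hx
          have hne : x ≠ a := fun h => haM (h ▸ hx)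
          push_cast at h1
          exact ⟨by omega, by omega, h1.2.2⟩
        · intro ⟨h1, h2, h3⟩
          exact (hmem x).mpr ⟨by omega, by push_cast; omega, h3⟩
      cases st with
      | none =>
        have htopu : (a + ((n+1 : Nat) : Int) - 1) ∈ m → (a + ((n+1 : Nat) : Int) - 2) ∈ m := htop
        have htop' : a + (n : Int) ∈ m → a + (n : Int) - 1 ∈ m := by
          intro h
          have := htopu (by rw [e1]; exact h)
          rwa [e2] at this
        rw [List.foldl_cons, pvStepA_not_mem_none v spans hA a hv]
        apply ih (a+1) m spans none hA hB hsort hmem'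
          (by intro l hl; cases hl)
        intro hT
        rw [e3] at hT
        rw [e4]
        exact htop' hT
      | some l =>
        obtain ⟨hla, hAe, hBe⟩ := hst l rfl
        subst hAe; subst hBe
        have htopu : ((a + ((n+1 : Nat) : Int) - 1) ∈ m → ((a + ((n+1 : Nat) : Int) - 2) ∈ m ∨ a + ((n+1 : Nat) : Int) - 1 = a)) ∧ ((n+1 : Nat) = 0 → l < a - 1) := htop
        rw [List.foldl_cons, pvStepA_not_mem_some v spans l (some (a-1)) a hv, Option.getD_some]
        rw [pvFlushB m spans l (a-1) (some (a-1)) (fun x hx => by have := (hmem' x).mp hx; omega)]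
        have hspan : pvSpanA l (a-1) = pvSpanB l (a-1) := rfl
        rw [hspan]
        apply ih (a+1) m (spans ++ [pvSpanB l (a-1)]) none (some (a-1)) (some (a-1)) hsort hmem'
          (by intro l' hl'; cases hl')
        intro hT
        rw [e3] at hT
        rw [e4]
        rcases htopu.1 (by rw [e1]; exact hT) with h | h
        · rwa [e2] at h
        · exfalso
          rw [e1] at h
          rw [h] at hT
          exact haM hT

lemma pvLabelEq (k : String) (v : List Int)
    (hD : ¬(v.length ≠ 4000 ∧ v ≠ [] ∧ (4000:Int) ∈ v ∧ (3999:Int) ∉ v)) :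
    pvLabelA k v = k ++ ": " ++ pvLabelB v := by
  unfold pvLabelA pvLabelB
  by_cases h1 : v.length = 4000
  · have hs : (": " : String) ++ "ALL" = ": ALL" := rfl
    simp [h1, String.append_assoc, hs]
  by_cases h2 : v.length = 0
  · have hs : (": " : String) ++ "NONE" = ": NONE" := rfl
    simp [h2, String.append_assoc, hs]
  rw [if_neg h1, if_neg h2, if_neg h1, if_neg h2]
  refine congrArg _ (congrArg _ ?_)
  rw [pvRuns_eq]
  have hne : v ≠ [] := by
    intro h
    exact h2 (by simp [h])
  have h4 : (4000:Int) ∈ v → (3999:Int) ∈ v := by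
    intro h40
    by_contra h39
    exact hD ⟨h1, hne, h40, h39⟩
  have hmem : ∀ x : Int, x ∈ PySem.List.sorted
      (PySem.Set.ofList (v.filter (fun x => 1 ≤ x && x ≤ 4000))) (fun x => x) false ↔
      ((1:Int) ≤ x ∧ x < 1 + ((4000:Nat):Int) ∧ v.contains x = true) := by
    intro x
    rw [PySem.List.mem_sorted, PySem.Set.mem_ofList, List.mem_filter]
    simp
    constructor
    · rintro ⟨hx, hb1, hb2⟩
      exact ⟨hb1, by omega, hx⟩
    · rintro ⟨hb1, hb2, hx⟩
      exact ⟨hx, hb1, by omega⟩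
  have := pvScanEq v 4000 1
    (PySem.List.sorted (PySem.Set.ofList (v.filter (fun x => 1 ≤ x && x ≤ 4000))) (fun x => x) false)
    [] none none none
    (PySem.List.sorted_ofList_pairwise_lt _)
    hmem
    (by intro l hl; cases hl)
    (by
      intro hT
      have e1 : (1:Int) + ((4000:Nat):Int) - 1 = 4000 := by norm_num
      have e2 : (1:Int) + ((4000:Nat):Int) - 2 = 3999 := by norm_num
      rw [e1] at hT
      rw [e2]
      have h40 : (4000:Int) ∈ v := by
        have := (hmem 4000).mp hT
        simpa [List.contains_iff_mem] using this.2.2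
      have h39 := h4 h40
      exact (hmem 3999).mpr ⟨by norm_num, by norm_num, by simpa [List.contains_iff_mem] using h39⟩)
  have he : (1:Int) + ((4000:Nat):Int) = 4001 := by norm_num
  rw [he] at this
  exact this

-- A's scan skips every non-member index without changing its state
lemma pvFoldA_skip (v : List Int) (a b : Int) (spans : List String) (h0 : Option Int)
    (h : ∀ i : Int, a ≤ i → i < b → ¬ v.contains i = true) :
    (PySem.List.pyRange a b 1).foldl (pvStepA v) (spans, none, h0) = (spans, none, h0) := by
  by_cases hab : b ≤ a
  · rw [PySem.List.pyRange_one_eq_nil hab]; rfl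
  have hn : ∃ n : Nat, b - a = (n : Int) := ⟨(b - a).toNat, by omega⟩
  obtain ⟨n, hn⟩ := hn
  induction n generalizing a with
  | zero => omega
  | succ n ih =>
    rw [PySem.List.pyRange_one_cons (by omega), List.foldl_cons,
      pvStepA_not_mem_none v spans h0 a (h a (le_refl a) (by omega))]
    by_cases hab' : b ≤ a + 1
    · rw [PySem.List.pyRange_one_eq_nil hab']; rfl
    · exact ih (a+1) (fun i h1 h2 => h i (by omega) h2) hab' (by omega)

-- ===== VERDICT (by name: the statement is the Claim_ definition above) =====
theorem describe_ranges_spec : Claim_unchanged_describe_ranges := by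
  intro ranges _ hnD
  unfold describe_ranges describe_ranges_alt
  rw [PySem.List.foldl_append_singleton_eq_map]
  refine congrArg _ ?_
  simp only [List.nil_append]
  refine List.map_congr_left (fun kv hkv => ?_)
  exact pvLabelEq kv.1 kv.2 (fun hbad => hnD ⟨kv, hkv, hbad⟩)

theorem describe_ranges_changed : Claim_changed_describe_ranges := by
  unfold Claim_changed_describe_ranges
  refine ⟨by decide, by decide, ?_, ?_, by decide⟩
  · show describe_ranges [("x", [4000])] = "x: 4000-4000"
    unfold describe_ranges pvLabelA
    rw [List.foldl_cons, List.foldl_nil]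
    norm_num
    rw [show (4001:Int) = 4000 + 1 from by norm_num, PySem.List.pyRange_one_succ_right (by norm_num),
      List.foldl_append,
      pvFoldA_skip [4000] 1 4000 [] none (by intro i h1 h2; simp; omega)]
    rw [List.foldl_cons, List.foldl_nil, pvStepA_mem [4000] [] none none 4000 (by decide)]
    decide
  · show describe_ranges_alt [("x", [4000])] = "x: 4000"
    unfold describe_ranges_alt pvLabelB
    norm_num
    rw [pvRuns_eq]
    decide
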